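-- pv_equiv track=rewrite | github.com/vbscharan/DSA | The Modified String - GFG/the-modified-string.py | modified
-- ===== SOURCE A (Python) =====
-- def modified(s):
--     #code here
--     k=0
--     i=1
--     while i<(len(s)-1):
--         if s[i-1]==s[i] and s[i]==s[i+1]:
--             k+=1
--             i+=1
--         i+=1
--     return k
-- ===== SOURCE B (Python) =====
-- from itertools import groupby
--
-- def modified(s):
--     return sum((sum(1 for _ in g) - 1) // 2 for _, g in groupby(s))
-- ===== Notes on version B (the rewrite author's own statement) =====
-- stated objective: simpler
-- what changed: Replaces the stateful index scan with skip-after-match by a run-length decomposition (itertools.groupby) summing the closed form (L-1)//2 per maximal run.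
import Mathlib
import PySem

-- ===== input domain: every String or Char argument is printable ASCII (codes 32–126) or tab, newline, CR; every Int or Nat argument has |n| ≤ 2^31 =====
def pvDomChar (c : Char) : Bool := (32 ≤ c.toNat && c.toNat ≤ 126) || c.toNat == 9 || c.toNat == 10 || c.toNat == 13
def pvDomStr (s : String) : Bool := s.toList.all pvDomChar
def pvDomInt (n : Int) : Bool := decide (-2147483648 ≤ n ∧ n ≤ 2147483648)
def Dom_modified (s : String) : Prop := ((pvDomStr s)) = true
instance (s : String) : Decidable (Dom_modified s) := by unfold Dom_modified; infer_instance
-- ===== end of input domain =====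

-- B replaces A's stateful index scan with skip by a run-length decomposition and the
-- closed form (L-1)//2 per run (objective: simpler / alternative decomposition).

-- ===== PORT A =====
-- A's while loop over center index i (the body only runs with 1 ≤ i < len-1, so all
-- three accesses are in range and getD is exact there).
def modifiedLoop (l : List Char) (i : Nat) (k : Int) : Int :=
  if _h : i < l.length - 1 then
    if l.getD (i-1) ' ' = l.getD i ' ' ∧ l.getD i ' ' = l.getD (i+1) ' ' then
      modifiedLoop l (i+2) (k+1)
    else
      modifiedLoop l (i+1) k
  else k
termination_by l.length - i
decreasing_by all_goals omega

def modified (s : String) : Int := modifiedLoop s.toList 1 0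

-- ===== PORT B =====
-- itertools.groupby over the characters: the list of maximal runs (char, length).
def rle (l : List Char) : List (Char × Nat) :=
  match l with
  | [] => []
  | c :: t =>
    match rle t with
    | [] => [(c, 1)]
    | (d, n) :: r => if c = d then (c, n+1) :: r else (c, 1) :: (d, n) :: r

def modified_alt (s : String) : Int :=
  ((rle s.toList).map (fun p => ((p.2 : Int) - 1) / 2)).sum

-- ===== PRECONDITION & SPEC =====
def Spec_modified (s : String) (out : Int) : Prop := out = modified_alt s
instance (s : String) (out : Int) : Decidable (Spec_modified s out) := by unfold Spec_modified; infer_instance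

-- ===== CLAIM (what is proved, stated in full; the proofs are below) =====
def Claim_equal_modified : Prop := ∀ (s : String), Dom_modified s → Spec_modified s (modified s)

-- ===== LEMMAS AND PROOFS =====

-- A's loop seen as a recursion on the 3-character window starting at i-1.
def scanA : List Char → Int
  | a :: b :: c :: t => if a = b ∧ b = c then 1 + scanA (c :: t) else scanA (b :: c :: t)
  | _ => 0

theorem modifiedLoop_eq_scanA (l : List Char) :
    ∀ (i : Nat) (k : Int), 1 ≤ i → modifiedLoop l i k = k + scanA (l.drop (i-1)) := by
  intro i k
  induction i, k using modifiedLoop.induct l with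
  | case1 i k h hc ih =>
    intro hi
    rw [modifiedLoop]
    simp only [h, dif_pos, hc]
    rw [ih (by omega)]
    have h1 : i - 1 < l.length := by omega
    have h2 : i < l.length := by omega
    have h3 : i + 1 < l.length := by omega
    have ei : i - 1 + 1 = i := by omega
    have e1 : List.drop (i-1) l = l[i-1] :: List.drop i l := by
      rw [List.drop_eq_getElem_cons h1, ei]
    have e2 : List.drop i l = l[i] :: List.drop (i+1) l := List.drop_eq_getElem_cons h2
    have e3 : List.drop (i+1) l = l[i+1] :: List.drop (i+2) l := List.drop_eq_getElem_cons h3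
    have ha : l.getD (i-1) ' ' = l[i-1] := by simp [List.getD, List.getElem?_eq_getElem h1]
    have hb : l.getD i ' ' = l[i] := by simp [List.getD, List.getElem?_eq_getElem h2]
    have hcc : l.getD (i+1) ' ' = l[i+1] := by simp [List.getD, List.getElem?_eq_getElem h3]
    have hab : l[i-1] = l[i] := by rw [← ha, ← hb]; exact hc.1
    have hbc : l[i] = l[i+1] := by rw [← hb, ← hcc]; exact hc.2
    have e0 : i + 2 - 1 = i + 1 := by omega
    rw [e0, e1, e2, e3, scanA]
    simp only [hab, hbc, and_self, if_true]
    rw [← List.drop_eq_getElem_cons h3]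
    ring
  | case2 i k h hc ih =>
    intro hi
    rw [modifiedLoop]
    simp only [h, dif_pos, hc]
    rw [ih (by omega)]
    have h1 : i - 1 < l.length := by omega
    have h2 : i < l.length := by omega
    have h3 : i + 1 < l.length := by omega
    have ei : i - 1 + 1 = i := by omega
    have e1 : List.drop (i-1) l = l[i-1] :: List.drop i l := by
      rw [List.drop_eq_getElem_cons h1, ei]
    have e2 : List.drop i l = l[i] :: List.drop (i+1) l := List.drop_eq_getElem_cons h2
    have e3 : List.drop (i+1) l = l[i+1] :: List.drop (i+2) l := List.drop_eq_getElem_cons h3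
    have ha : l.getD (i-1) ' ' = l[i-1] := by simp [List.getD, List.getElem?_eq_getElem h1]
    have hb : l.getD i ' ' = l[i] := by simp [List.getD, List.getElem?_eq_getElem h2]
    have hcc : l.getD (i+1) ' ' = l[i+1] := by simp [List.getD, List.getElem?_eq_getElem h3]
    have e0 : i + 1 - 1 = i := by omega
    have hq : ¬ (l[i-1] = l[i] ∧ l[i] = l[i+1]) := by
      intro hx
      exact hc ⟨by rw [ha, hb]; exact hx.1, by rw [hb, hcc]; exact hx.2⟩
    rw [e0, e1, e2, e3, scanA]
    simp only [hq, if_false]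
  | case3 i k h =>
    intro hi
    rw [modifiedLoop]
    simp only [h]
    have hlen : (l.drop (i-1)).length ≤ 2 := by
      simp only [List.length_drop]; omega
    match hm : l.drop (i-1) with
    | [] => simp [scanA]
    | [a] => simp [scanA]
    | [a, b] => simp [scanA]
    | a :: b :: c :: t => rw [hm] at hlen; simp at hlen

-- scanA on a maximal run of length L+1 followed by rest not starting with the run's char.
theorem scanA_run (c : Char) (L : Nat) (rest : List Char)
    (hr : ∀ d t, rest = d :: t → d ≠ c) :
    scanA (List.replicate (L+1) c ++ rest) = ((L : Int)) / 2 + scanA rest := by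
  induction L using Nat.strong_induction_on with
  | _ L ih =>
    match L with
    | 0 =>
      match rest with
      | [] => simp [scanA]
      | [d] => simp [scanA]
      | d :: e :: t =>
        have hdc : d ≠ c := hr d (e :: t) rfl
        show scanA (c :: d :: e :: t) = 0 / 2 + scanA (d :: e :: t)
        rw [scanA, if_neg (by intro ⟨x, _⟩; exact hdc x.symm)]
        norm_num
    | 1 =>
      match rest with
      | [] => simp [scanA]
      | d :: t =>
        have hdc : d ≠ c := hr d t rfl
        show scanA (c :: c :: d :: t) = 1 / 2 + scanA (d :: t)
        rw [scanA, if_neg (by intro ⟨_, y⟩; exact hdc y.symm)]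
        match t with
        | [] => simp [scanA]
        | e :: t' =>
          rw [scanA, if_neg (by intro ⟨x, _⟩; exact hdc x.symm)]
          norm_num
    | (L+2) =>
      have hrep : List.replicate (L+1) c ++ rest = c :: (List.replicate L c ++ rest) := by
        simp [List.replicate_succ]
      have hh : List.replicate (L+2+1) c ++ rest
          = c :: c :: (List.replicate (L+1) c ++ rest) := by
        simp [List.replicate_succ]
      rw [hh, hrep, scanA, if_pos ⟨rfl, rfl⟩, ← hrep, ih L (by omega)]
      have e : ((L : Int) + 2) / 2 = (L : Int) / 2 + 1 := by omega
      push_cast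
      rw [e]
      ring

-- the head character of rle (c :: t) is c
theorem rle_cons (c : Char) (t : List Char) : ∃ n r, rle (c :: t) = (c, n) :: r := by
  rw [rle]
  match rle t with
  | [] => exact ⟨1, [], rfl⟩
  | (d, n) :: r =>
    by_cases h : c = d
    · subst h; exact ⟨n+1, r, by simp⟩
    · exact ⟨1, (d, n) :: r, by simp [h]⟩

-- rle of a maximal leading run
theorem rle_run (c : Char) (n : Nat) (rest : List Char)
    (hr : ∀ d t, rest = d :: t → d ≠ c) :
    rle (List.replicate (n+1) c ++ rest) = (c, n+1) :: rle rest := by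
  induction n with
  | zero =>
    match rest with
    | [] => simp [rle]
    | d :: t =>
      have hdc : d ≠ c := hr d t rfl
      obtain ⟨m, r, hm⟩ := rle_cons d t
      have hcd : c ≠ d := fun h => hdc h.symm
      show rle (c :: d :: t) = (c, 1) :: rle (d :: t)
      rw [rle, hm]
      simp [hcd]
  | succ n ih =>
    have hh : List.replicate (n+1+1) c ++ rest = c :: (List.replicate (n+1) c ++ rest) := by
      simp [List.replicate_succ]
    rw [hh, rle, ih]
    simp

-- every nonempty list splits into a maximal leading run and a rest
theorem run_split (c : Char) (t : List Char) :
    ∃ n rest, c :: t = List.replicate (n+1) c ++ rest ∧ (∀ d t', rest = d :: t' → d ≠ c) := by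
  induction t generalizing c with
  | nil => exact ⟨0, [], by simp, by intro d t' h; simp at h⟩
  | cons d t' ih =>
    by_cases h : d = c
    · subst h
      obtain ⟨n, rest, he, hne⟩ := ih d
      exact ⟨n+1, rest, by rw [List.replicate_succ, List.cons_append, ← he], hne⟩
    · exact ⟨0, d :: t', by simp, by intro e t'' he; simp at he; exact fun hc => h (he.1 ▸ hc)⟩

-- scanA equals the per-run sum of (L-1)//2.
theorem scanA_rle (l : List Char) :
    scanA l = ((rle l).map (fun p => ((p.2 : Int) - 1) / 2)).sum := by
  induction hL : l.length using Nat.strong_induction_on generalizing l with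
  | _ L ih =>
    match l with
    | [] => rfl
    | c :: t =>
      obtain ⟨n, rest, he, hne⟩ := run_split c t
      rw [he, scanA_run c n rest hne, rle_run c n rest hne]
      have hlen : rest.length < L := by
        have h1 := congrArg List.length he
        have h2 : t.length + 1 = L := by simpa using hL
        simp at h1
        omega
      rw [List.map_cons, List.sum_cons, ih rest.length hlen rest rfl]
      push_cast
      ring_nf

theorem modified_eq_scan (s : String) : modified s = scanA s.toList := by
  rw [modified, modifiedLoop_eq_scanA s.toList 1 0 (le_refl 1)]
  simp

-- ===== VERDICT (by name: the statement is the Claim_ definition above) =====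
theorem modified_spec : Claim_equal_modified := by
  intro s _
  unfold Spec_modified modified_alt
  rw [modified_eq_scan, scanA_rle]
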